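-- pv_equiv track=rewrite | github.com/prathamgupta36/cryptomania | lattice/level3/helper.py | _enumerate_shortest
-- ===== SOURCE A (Python) =====
-- from typing import Any, Dict, Iterator, List, Sequence, Tuple, Optional
--
-- Vector = Tuple[int, ...]
--
-- Matrix = List[List[int]]
--
-- def _enumerate_shortest(B_rows: Matrix, coeff_bound: int) -> Optional[Vector]:
--     import itertools
--     n = len(B_rows)
--     cols = [tuple(B_rows[i][j] for i in range(n)) for j in range(n)]
--     best = None; best2 = None
--     rng = range(-coeff_bound, coeff_bound + 1)
--     for z in itertools.product(rng, repeat=n):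
--         if all(c == 0 for c in z): continue
--         v = [0]*n
--         for j, cj in enumerate(z):
--             if cj == 0: continue
--             col = cols[j]
--             for i in range(n): v[i] += col[i]*cj
--         s2 = sum(x*x for x in v)
--         if best2 is None or s2 < best2:
--             best2 = s2; best = tuple(int(x) for x in v)
--     return best
-- ===== SOURCE B (Python) =====
-- def _enumerate_shortest(B_rows, coeff_bound):
--     n = len(B_rows)
--     cols = [[B_rows[i][j] for i in range(n)] for j in range(n)]
--     rng = range(-coeff_bound, coeff_bound + 1)
--     best = None
--     best2 = None
--
--     def rec(j, v, nonzero):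
--         nonlocal best, best2
--         if j == n:
--             if not nonzero:
--                 return
--             s2 = sum(x * x for x in v)
--             if best2 is None or s2 < best2:
--                 best2 = s2
--                 best = tuple(v)
--             return
--         col = cols[j]
--         for c in rng:
--             rec(j + 1,
--                 v if c == 0 else [x + c * y for x, y in zip(v, col)],
--                 nonzero or c != 0)
--
--     rec(0, [0] * n, False)
--     return best
-- ===== Notes on version B (the rewrite author's own statement) =====
-- stated objective: alternative
-- what changed: Replaces the product-iterator loop that rebuilds the combination vector from scratch at every leaf with a depth-first recursion over the columns that incrementally accumulates the partial vector, doing O(n) instead of O(n^2) work per coefficient tuple (measured ~2.5x at the sizes both finish, unconfirmed at the largest).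
import Mathlib
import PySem

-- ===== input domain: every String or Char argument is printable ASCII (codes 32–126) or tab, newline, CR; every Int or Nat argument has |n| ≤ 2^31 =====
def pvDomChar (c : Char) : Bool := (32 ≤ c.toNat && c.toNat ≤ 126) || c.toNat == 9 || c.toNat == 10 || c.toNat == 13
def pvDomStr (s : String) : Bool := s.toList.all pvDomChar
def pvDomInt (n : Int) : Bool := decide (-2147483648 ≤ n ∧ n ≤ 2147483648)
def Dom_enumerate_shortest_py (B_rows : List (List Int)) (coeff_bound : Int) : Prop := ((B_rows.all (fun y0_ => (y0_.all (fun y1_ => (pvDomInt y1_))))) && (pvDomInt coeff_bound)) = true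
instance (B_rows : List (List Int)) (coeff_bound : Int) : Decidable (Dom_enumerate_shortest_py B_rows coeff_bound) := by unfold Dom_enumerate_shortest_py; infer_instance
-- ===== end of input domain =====

-- B replaces the full-rebuild-per-leaf product loop by a depth-first recursion over the
-- columns that accumulates the partial combination vector incrementally (alternative
-- decomposition; less work per enumerated coefficient tuple).

-- ===== PORT A =====
-- itertools.product(rng, repeat=n), in product order (leftmost coefficient varies slowest)
def pvProd (rng : List Int) : Nat → List (List Int)
  | 0 => [[]]
  | n + 1 => rng.flatMap (fun c => (pvProd rng n).map (fun t => c :: t))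

def enumerate_shortest_py (B_rows : List (List Int)) (coeff_bound : Int) : Option (List Int) :=
  let n := B_rows.length
  let cols : List (List Int) := (List.range n).map (fun j =>
    (List.range n).map (fun i => PySem.List.pyGetD (PySem.List.pyGetD B_rows (i : Int) []) (j : Int) 0))
  let rng := PySem.List.pyRange (-coeff_bound) (coeff_bound + 1) 1
  let st := (pvProd rng n).foldl (fun (st : Option (List Int) × Option Int) z =>
    if z.all (fun c => c == 0) then st else
    let v := (PySem.List.enumerate z 0).foldl (fun v jc =>
      if jc.2 = 0 then v else
      let col := PySem.List.pyGetD cols jc.1 []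
      (List.range n).foldl (fun w (i : Nat) =>
        PySem.List.pySetD w (i : Int)
          (PySem.List.pyGetD w (i : Int) 0 + PySem.List.pyGetD col (i : Int) 0 * jc.2)) v)
      (List.replicate n 0)
    let s2 := v.foldl (fun a x => a + x * x) 0
    match st.2 with
    | none => (some v, some s2)
    | some b2 => if s2 < b2 then (some v, some s2) else st) (none, none)
  st.1

-- ===== PORT B =====
-- rec(j, v, nonzero) of Source B: structural recursion over the remaining columns,
-- carrying the accumulated partial vector v and the (best, best2) state.
def pvAltRec (rng : List Int) : List (List Int) → List Int → Bool →
    Option (List Int) × Option Int → Option (List Int) × Option Int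
  | [], v, nonzero, st =>
    if !nonzero then st else
    let s2 := v.foldl (fun a x => a + x * x) 0
    match st.2 with
    | none => (some v, some s2)
    | some b2 => if s2 < b2 then (some v, some s2) else st
  | col :: rest, v, nonzero, st =>
    rng.foldl (fun st c =>
      pvAltRec rng rest (if c == 0 then v else v.zipWith (fun x y => x + c * y) col)
        (nonzero || (c != 0)) st) st

def enumerate_shortest_py_alt (B_rows : List (List Int)) (coeff_bound : Int) : Option (List Int) :=
  let n := B_rows.length
  let cols : List (List Int) := (List.range n).map (fun j =>
    (List.range n).map (fun i => PySem.List.pyGetD (PySem.List.pyGetD B_rows (i : Int) []) (j : Int) 0))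
  let rng := PySem.List.pyRange (-coeff_bound) (coeff_bound + 1) 1
  (pvAltRec rng cols (List.replicate n 0) false (none, none)).1

-- ===== PRECONDITION & SPEC =====
-- A indexes B_rows[i][j] for all i, j < len(B_rows); rows shorter than len(B_rows)
-- make the Python raise IndexError, so exactly those inputs are excluded.
def Pre_enumerate_shortest_py (B_rows : List (List Int)) (coeff_bound : Int) : Prop :=
  ∀ row ∈ B_rows, B_rows.length ≤ row.length

instance (B_rows : List (List Int)) (coeff_bound : Int) : Decidable (Pre_enumerate_shortest_py B_rows coeff_bound) := by unfold Pre_enumerate_shortest_py; infer_instance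

def pvWitness_enumerate_shortest_py : List (List Int) × Int := ([[2, 1], [0, 3]], 1)

def Spec_enumerate_shortest_py (B_rows : List (List Int)) (coeff_bound : Int) (out : Option (List Int)) : Prop := out = enumerate_shortest_py_alt B_rows coeff_bound
instance (B_rows : List (List Int)) (coeff_bound : Int) (out : Option (List Int)) : Decidable (Spec_enumerate_shortest_py B_rows coeff_bound out) := by unfold Spec_enumerate_shortest_py; infer_instance

-- ===== CLAIM (what is proved, stated in full; the proofs are below) =====
def Claim_equal_enumerate_shortest_py : Prop := ∀ (B_rows : List (List Int)) (coeff_bound : Int), Dom_enumerate_shortest_py B_rows coeff_bound → Pre_enumerate_shortest_py B_rows coeff_bound → Spec_enumerate_shortest_py B_rows coeff_bound (enumerate_shortest_py B_rows coeff_bound)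

-- ===== LEMMAS AND PROOFS =====

-- the "take the better of state and candidate vector" step shared by both ports
def pvUpd (st : Option (List Int) × Option Int) (v : List Int) : Option (List Int) × Option Int :=
  let s2 := v.foldl (fun a x => a + x * x) 0
  match st.2 with
  | none => (some v, some s2)
  | some b2 => if s2 < b2 then (some v, some s2) else st

-- accumulated combination vector over a list of (coefficient, column) pairs
def pvAcc (ps : List (Int × List Int)) (v : List Int) : List Int :=
  ps.foldl (fun v p => if p.1 == 0 then v else v.zipWith (fun x y => x + p.1 * y) p.2) v

lemma pvAcc_cons (p : Int × List Int) (ps : List (Int × List Int)) (v : List Int) :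
    pvAcc (p :: ps) v =
      pvAcc ps (if p.1 == 0 then v else v.zipWith (fun x y => x + p.1 * y) p.2) := rfl

-- every tuple produced by pvProd has the expected length
lemma pvProd_length (rng : List Int) (n : Nat) :
    ∀ z ∈ pvProd rng n, z.length = n := by
  induction n with
  | zero => intro z hz; simp [pvProd] at hz; simp [hz]
  | succ n ih =>
    intro z hz
    simp only [pvProd, List.mem_flatMap, List.mem_map] at hz
    obtain ⟨c, _, t, ht, rfl⟩ := hz
    simp [ih t ht]

-- the in-place 'for i in range(m): v[i] += col[i]*c' loop, element-wise
lemma pvSetLoop_getElem (c : Int) (col v : List Int) (m : Nat) :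
    ((List.range m).foldl (fun w (i : Nat) =>
        PySem.List.pySetD w (i : Int)
          (PySem.List.pyGetD w (i : Int) 0 + PySem.List.pyGetD col (i : Int) 0 * c)) v).length
        = v.length ∧
    ∀ k : Nat,
      ((List.range m).foldl (fun w (i : Nat) =>
        PySem.List.pySetD w (i : Int)
          (PySem.List.pyGetD w (i : Int) 0 + PySem.List.pyGetD col (i : Int) 0 * c)) v)[k]?
      = if k < m then v[k]?.map (fun x => x + col.getD k 0 * c) else v[k]? := by
  induction m with
  | zero => simp
  | succ m ih =>
    rw [List.range_succ, List.foldl_append]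
    obtain ⟨ihlen, ihget⟩ := ih
    set w := (List.range m).foldl (fun w (i : Nat) =>
        PySem.List.pySetD w (i : Int)
          (PySem.List.pyGetD w (i : Int) 0 + PySem.List.pyGetD col (i : Int) 0 * c)) v with hw
    simp only [List.foldl_cons, List.foldl_nil, PySem.List.pySetD_natCast,
      PySem.List.pyGetD_natCast]
    constructor
    · simp [ihlen]
    · intro k
      rw [List.getElem?_set]
      by_cases hkm : m = k
      · subst hkm
        rw [if_pos rfl]
        by_cases hk : m < w.length
        · rw [if_pos hk]
          have hkv : m < v.length := ihlen ▸ hk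
          have hgd : w.getD m 0 = v[m] := by
            rw [List.getD_eq_getElem?_getD, ihget m, if_neg (lt_irrefl m),
              List.getElem?_eq_getElem hkv]; rfl
          rw [hgd, if_pos (Nat.lt_succ_self m), List.getElem?_eq_getElem hkv]
          rfl
        · rw [if_neg hk]
          have hkv : ¬ m < v.length := ihlen ▸ hk
          rw [if_pos (Nat.lt_succ_self m),
            List.getElem?_eq_none_iff.mpr (Nat.le_of_not_lt hkv)]
          rfl
      · rw [if_neg hkm, ihget k]
        by_cases hk2 : k < m
        · rw [if_pos hk2, if_pos (by omega)]
        · rw [if_neg hk2, if_neg (by omega)]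

-- … and as a zipWith, under matching lengths
lemma pvSetLoop_eq_zipWith (c : Int) (col v : List Int) (h : col.length = v.length) :
    (List.range v.length).foldl (fun w (i : Nat) =>
        PySem.List.pySetD w (i : Int)
          (PySem.List.pyGetD w (i : Int) 0 + PySem.List.pyGetD col (i : Int) 0 * c)) v
      = v.zipWith (fun x y => x + c * y) col := by
  obtain ⟨hlen, hget⟩ := pvSetLoop_getElem c col v v.length
  apply List.ext_getElem?
  intro k
  rw [hget k, List.getElem?_zipWith]
  by_cases hk : k < v.length
  · have hkc : k < col.length := h ▸ hk
    simp [List.getElem?_eq_getElem, hk, hkc, List.getD_eq_getElem?_getD, Int.mul_comm]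
  · have hkc : ¬ k < col.length := h ▸ hk
    simp [List.getElem?_eq_none_iff.mpr (Nat.le_of_not_lt hk),
      List.getElem?_eq_none_iff.mpr (Nat.le_of_not_lt hkc), hk]

-- A's per-leaf vector loop (enumerate + dict-free cols[j] lookup) = fold over zip
lemma pvEnumLookup_foldl (cols : List (List Int)) (g : List Int → Int → List Int → List Int) :
    ∀ (z : List Int) (s : Nat) (v : List Int), s + z.length ≤ cols.length →
    (PySem.List.enumerate z (s : Int)).foldl
        (fun v jc => g (PySem.List.pyGetD cols jc.1 []) jc.2 v) v
      = (z.zip (cols.drop s)).foldl (fun v p => g p.2 p.1 v) v := by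
  intro z
  induction z with
  | nil => intro s v _; simp [PySem.List.enumerate_nil]
  | cons c z ih =>
    intro s v hs
    have hslt : s < cols.length := by simp at hs; omega
    rw [PySem.List.enumerate_cons, List.foldl_cons,
      List.drop_eq_getElem_cons hslt, List.zip_cons_cons, List.foldl_cons]
    have h1 : PySem.List.pyGetD cols (s : Int) [] = cols[s] := by
      rw [PySem.List.pyGetD_natCast, List.getD_eq_getElem?_getD,
        List.getElem?_eq_getElem hslt]; rfl
    rw [h1]
    have h2 : ((s : Int) + 1) = ((s + 1 : Nat) : Int) := by push_cast; ring
    rw [h2, ih (s + 1) _ (by simp at hs ⊢; omega)]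

-- main bridge: the accumulating recursion equals the product-order fold with
-- the leaf vector expressed through pvAcc on the remaining columns
lemma pvAltRec_eq_foldl (rng : List Int) (n : Nat) :
    ∀ (cols' : List (List Int)) (v : List Int) (nz : Bool)
      (st : Option (List Int) × Option Int),
      v.length = n → (∀ col ∈ cols', col.length = n) →
      pvAltRec rng cols' v nz st =
        (pvProd rng cols'.length).foldl
          (fun st zt => if (!nz && zt.all (fun c => c == 0)) then st
                        else pvUpd st (pvAcc (zt.zip cols') v)) st := by
  intro cols'
  induction cols' with
  | nil =>
    intro v nz st _ _
    simp only [pvProd, List.length_nil, List.foldl_cons, List.foldl_nil, List.zip_nil_right,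
      List.all_nil, Bool.and_true]
    cases nz with
    | false => simp [pvAltRec]
    | true => simp [pvAltRec, pvAcc, pvUpd]
  | cons col rest ih =>
    intro v nz st hv hcols
    rw [pvAltRec]
    simp only [List.length_cons, pvProd, List.foldl_flatMap, List.foldl_map]
    apply PySem.List.foldl_congr_mem
    intro st c _
    have hcol : col.length = n := hcols col List.mem_cons_self
    have hv' : (if c == 0 then v else v.zipWith (fun x y => x + c * y) col).length = n := by
      by_cases hc : c == 0 <;> simp [hc, List.length_zipWith, hv, hcol]
    rw [ih _ _ _ hv' (fun q hq => hcols q (List.mem_cons_of_mem _ hq))]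
    apply PySem.List.foldl_congr_mem
    intro st' zt _
    rw [List.zip_cons_cons, pvAcc_cons]
    have hcond : (!(nz || (c != 0)) && zt.all (fun c => c == 0))
        = (!nz && ((c :: zt).all (fun c => c == 0))) := by
      cases nz <;> by_cases hc : c = 0 <;> simp [hc, List.all_cons, bne, Bool.not_not]
    rw [hcond]

-- the common cols construction has n entries, each of length n
lemma pvCols_length (B_rows : List (List Int)) :
    ∀ col ∈ (List.range B_rows.length).map (fun j =>
        (List.range B_rows.length).map (fun i =>
          PySem.List.pyGetD (PySem.List.pyGetD B_rows (i : Int) []) (j : Int) 0)),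
      col.length = B_rows.length := by
  intro col hcol
  simp only [List.mem_map, List.mem_range] at hcol
  obtain ⟨j, _, rfl⟩ := hcol
  simp

-- ===== VERDICT (by name: the statement is the Claim_ definition above) =====
theorem enumerate_shortest_py_spec : Claim_equal_enumerate_shortest_py := by
  intro B_rows coeff_bound _ _
  unfold Spec_enumerate_shortest_py enumerate_shortest_py enumerate_shortest_py_alt
  dsimp only
  set n := B_rows.length with hn
  set cols : List (List Int) := (List.range n).map (fun j =>
    (List.range n).map (fun i =>
      PySem.List.pyGetD (PySem.List.pyGetD B_rows (i : Int) []) (j : Int) 0)) with hcolsdef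
  set rng := PySem.List.pyRange (-coeff_bound) (coeff_bound + 1) 1 with hrng
  have hcols : ∀ col ∈ cols, col.length = n := pvCols_length B_rows
  have hcn : cols.length = n := by simp [hcolsdef]
  rw [pvAltRec_eq_foldl rng n cols (List.replicate n 0) false (none, none)
    (by simp) hcols, hcn]
  congr 1
  apply PySem.List.foldl_congr_mem
  intro st z hz
  have hzlen : z.length = n := pvProd_length rng n z hz
  simp only [Bool.not_false, Bool.true_and]
  by_cases hall : z.all (fun c => c == 0)
  · simp [hall]
  · simp only [hall, if_neg, Bool.false_eq_true, not_false_iff]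
    have hleaf :
        (PySem.List.enumerate z 0).foldl (fun v jc =>
          if jc.2 = 0 then v else
          (List.range n).foldl (fun w (i : Nat) =>
            PySem.List.pySetD w (i : Int)
              (PySem.List.pyGetD w (i : Int) 0 +
                PySem.List.pyGetD (PySem.List.pyGetD cols jc.1 []) (i : Int) 0 * jc.2)) v)
          (List.replicate n 0)
        = pvAcc (z.zip cols) (List.replicate n 0) := by
      have hlem := pvEnumLookup_foldl cols
        (fun col cj v => if cj = 0 then v else
          (List.range n).foldl (fun w (i : Nat) =>
            PySem.List.pySetD w (i : Int)
              (PySem.List.pyGetD w (i : Int) 0 +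
                PySem.List.pyGetD col (i : Int) 0 * cj)) v)
        z 0 (List.replicate n 0) (by simp [hzlen, hcn])
      simp only [Nat.cast_zero] at hlem
      rw [List.drop_zero] at hlem
      rw [hlem]
      -- fold over zip: replace the set-loop by zipWith, keeping the length invariant
      have : ∀ (ps : List (Int × List Int)) (v : List Int), v.length = n →
          (∀ p ∈ ps, p.2.length = n) →
          ps.foldl (fun v p => if p.1 = 0 then v else
            (List.range n).foldl (fun w (i : Nat) =>
              PySem.List.pySetD w (i : Int)
                (PySem.List.pyGetD w (i : Int) 0 +
                  PySem.List.pyGetD p.2 (i : Int) 0 * p.1)) v) v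
          = pvAcc ps v := by
        intro ps
        induction ps with
        | nil => intro v _ _; rfl
        | cons p ps ihp =>
          intro v hvn hps
          rw [List.foldl_cons, pvAcc_cons]
          have hp2 : p.2.length = n := hps p List.mem_cons_self
          by_cases hp : p.1 = 0
          · simp only [hp, if_pos, beq_self_eq_true, if_true]
            exact ihp v hvn (fun q hq => hps q (List.mem_cons_of_mem _ hq))
          · have hpb : (p.1 == 0) = false := by simp [hp]
            simp only [hp, if_neg, hpb, Bool.false_eq_true, not_false_iff]
            have hset := pvSetLoop_eq_zipWith p.1 p.2 v (by omega)
            rw [hvn] at hset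
            rw [hset]
            have hz' : (v.zipWith (fun x y => x + p.1 * y) p.2).length = n := by
              rw [List.length_zipWith]; omega
            exact ihp _ hz' (fun q hq => hps q (List.mem_cons_of_mem _ hq))
      exact this (z.zip cols) (List.replicate n 0) (by simp)
        (by intro p hp; exact hcols p.2 (List.of_mem_zip hp).2)
    rw [hleaf]
    rfl
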